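-- pv_equiv track=rewrite | github.com/LucasVaa/contentChain | contentCA/generateCid/generateCid.py | generate_identity
-- ===== SOURCE A (Python) =====
-- def generate_identity(cid):
--     """
--     Generated unique identification of content.
--
--     Args:
--         db: Database instance to store unique identification of content.
--
--     Returns:
--         Unique identification of content
--     """
--     if(cid == ''):
--         cid = 0
--         cid = convert(cid)
--         return cid
--     else:
--         list_a = ['0', '1', '2', '3', '4', '5', '6', '7', '8', '9',
--               'A', 'B', 'C', 'D', 'E', 'F', 'G', 'H', 'J', 'K',
--               'L', 'M', 'N', 'P', 'Q', 'R', 'T', 'U', 'V', 'W', 'X', 'Y']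
--         list_b = list(cid)
--         length = len(list_b)
--         cid = 0
--         for i in range(length):
--             cid += list_a.index(list_b[i]) * pow(32, length - i - 1)
--         cid += 1
--         cid = convert(cid)
--         return cid
--
-- def convert(cid):
--     """
--     Convert cid to 32 base.
--
--     Args:
--         cid: Unique identification of content on the contentChain.
--
--     Returns:
--         32 base content identification.
--     """
--     list_a = [0, 1, 2, 3, 4, 5, 6, 7, 8, 9, 'A', 'B', 'C', 'D',
--               'E', 'F', 'G', 'H', 'J', 'K', 'L', 'M', 'N', 'P',
--               'Q', 'R', 'T', 'U', 'V', 'W', 'X', 'Y']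
--     list_b = []
--     list_c = []
--     a = ''
--     while True:
--         s = cid//32
--         y = cid % 32
--         list_b.append(y)
--         if s == 0:
--             break
--         cid = s
--     for i in range(8-len(list_b)):
--         list_b.append(0)
--     list_b.reverse()
--     for i in list_b:
--         list_c.append(list_a[i])
--     for i in range(len(list_c)):
--         a = a + str(list_c[i])
--     return a
-- ===== SOURCE B (Python) =====
-- # Digit-wise increment with carry over the base-32 symbols (no full decode/re-encode);
-- # equivalence is about the return value only.
-- ALPHABET = '0123456789ABCDEFGHJKLMNPQRTUVWXY'
-- IDX = {c: i for i, c in enumerate(ALPHABET)}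
--
--
-- def _incr(rdigits):
--     """Increment a little-endian digit list by one."""
--     if not rdigits:
--         return [1]
--     if rdigits[0] == 31:
--         return [0] + _incr(rdigits[1:])
--     return [rdigits[0] + 1] + rdigits[1:]
--
--
-- def generate_identity(cid):
--     if cid == '':
--         digits = [0]          # empty id encodes the value 0
--     else:
--         digits = [IDX[c] for c in cid]
--         digits = _incr(digits[::-1])[::-1]
--     # normalise leading zeros
--     while len(digits) > 1 and digits[0] == 0:
--         digits.pop(0)
--     # pad to the minimum width of 8
--     if len(digits) < 8:
--         digits = [0] * (8 - len(digits)) + digits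
--     return ''.join(ALPHABET[d] for d in digits)
-- ===== Notes on version B (the rewrite author's own statement) =====
-- stated objective: alternative
-- what changed: B increments the base-32 digit string directly with a right-to-left carry (then normalises leading zeros and pads to width 8) instead of decoding the whole string to an integer with a power-weighted sum and re-encoding it by repeated division.
import Mathlib
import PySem

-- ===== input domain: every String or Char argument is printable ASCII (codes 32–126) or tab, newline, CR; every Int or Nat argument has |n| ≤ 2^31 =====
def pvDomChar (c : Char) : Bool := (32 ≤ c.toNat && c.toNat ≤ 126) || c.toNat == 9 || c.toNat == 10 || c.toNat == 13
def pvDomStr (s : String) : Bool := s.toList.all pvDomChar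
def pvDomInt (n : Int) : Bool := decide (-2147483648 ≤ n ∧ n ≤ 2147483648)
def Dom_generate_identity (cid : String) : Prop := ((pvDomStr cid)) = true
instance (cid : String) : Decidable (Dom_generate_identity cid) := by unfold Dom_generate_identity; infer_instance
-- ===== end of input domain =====

-- B increments the base-32 digits in place with a carry instead of decoding to an
-- integer and re-encoding; same return value on every input A accepts (alternative
-- decomposition, no speed claim).

-- the 32-symbol alphabet (shared literal of both programs)
def pvAlpha : List Char :=
  ['0','1','2','3','4','5','6','7','8','9','A','B','C','D','E','F','G','H','J','K',
   'L','M','N','P','Q','R','T','U','V','W','X','Y']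

-- ===== PORT A =====
-- the `while True` loop of `convert` (the dite guard only makes it total; Python diverges for cid < 0, unreachable here)
def pvConvLoop (cid : Int) : List Int :=
  let s := PySem.Int.floordiv cid 32
  let y := PySem.Int.mod cid 32
  if _h : 0 < s then y :: pvConvLoop s else [y]
termination_by cid.toNat
decreasing_by
  have e : PySem.Int.floordiv cid 32 = cid / 32 := PySem.Int.floordiv_eq_ediv_of_pos (by norm_num)
  simp only [e] at _h ⊢
  omega

-- helper `convert` of A; list_a[i] never IndexErrors here (digits lie in [0,32)), so the getD default is unused
def pvConvert (cid : Int) : String :=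
  let list_b := pvConvLoop cid
  let list_b := list_b ++ List.replicate (8 - list_b.length) (0:Int)
  let list_b := list_b.reverse
  let list_c := list_b.map (fun i => (PySem.List.pyGet? pvAlpha i).getD '0')
  String.ofList list_c

def generate_identity (cid : String) : String :=
  if cid = "" then pvConvert 0
  else
    let list_b := cid.toList
    let length := list_b.length
    -- list_a.index(list_b[i]) raises ValueError off the alphabet: Pre_ excludes that (the getD 0 default is unused inside Pre_)
    let v := (List.range length).foldl
      (fun acc i =>
        acc + (((PySem.List.index? pvAlpha (list_b.getD i ' ')).getD 0 : Nat) : Int)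
                * 32 ^ (length - i - 1)) 0
    pvConvert (v + 1)

-- ===== PORT B =====
-- `_incr` of Source B: add one to a little-endian digit list
def pvIncr : List Nat → List Nat
  | [] => [1]
  | d :: ds => if d = 31 then 0 :: pvIncr ds else (d + 1) :: ds

-- the leading-zero normalisation loop of Source B
def pvStrip : List Nat → List Nat
  | 0 :: d :: ds => pvStrip (d :: ds)
  | l => l

def generate_identity_alt (cid : String) : String :=
  let digits :=
    if cid = "" then [0]
    else (pvIncr ((cid.toList.map (fun c => pvAlpha.idxOf c)).reverse)).reverse
  let digits := pvStrip digits
  let digits := List.replicate (8 - digits.length) 0 ++ digits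
  String.ofList (digits.map (fun d => pvAlpha.getD d '0'))

-- ===== PRECONDITION & SPEC =====
-- Pre_ excludes exactly the strings with a character outside the 32-symbol alphabet, on which A raises ValueError.
def Pre_generate_identity (cid : String) : Prop :=
  cid.toList.all (fun c => pvAlpha.contains c) = true
instance (cid : String) : Decidable (Pre_generate_identity cid) := by
  unfold Pre_generate_identity; infer_instance
def pvWitness_generate_identity : String := "A1"

def Spec_generate_identity (cid : String) (out : String) : Prop := out = generate_identity_alt cid
instance (cid : String) (out : String) : Decidable (Spec_generate_identity cid out) := by
  unfold Spec_generate_identity; infer_instance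

-- ===== CLAIM (what is proved, stated in full; the proofs are below) =====
def Claim_equal_generate_identity : Prop :=
  ∀ (cid : String), Dom_generate_identity cid → Pre_generate_identity cid →
    Spec_generate_identity cid (generate_identity cid)

-- ===== LEMMAS AND PROOFS =====

-- the repeated-division loop produces the little-endian base-32 digits
theorem pvConvLoop_natCast (m : Nat) :
    pvConvLoop (m : Int) = if m = 0 then [(0:Int)] else (Nat.digits 32 m).map Int.ofNat := by
  induction m using Nat.strong_induction_on with
  | _ m ih =>
    have e1 : PySem.Int.floordiv (m : Int) 32 = ((m / 32 : Nat) : Int) := by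
      exact_mod_cast PySem.Int.floordiv_natCast m 32
    have e2 : PySem.Int.mod (m : Int) 32 = ((m % 32 : Nat) : Int) := by
      exact_mod_cast PySem.Int.mod_natCast m 32
    rw [pvConvLoop]
    simp only [e1, e2]
    by_cases h32 : m < 32
    · have h0 : ¬ (0 : Int) < ((m / 32 : Nat) : Int) := by
        have : m / 32 = 0 := Nat.div_eq_of_lt h32
        simp [this]
      rw [dif_neg h0]
      by_cases hm : m = 0
      · simp [hm]
      · rw [if_neg hm]
        rw [Nat.digits_def' (by norm_num) (Nat.pos_of_ne_zero hm)]
        have : m / 32 = 0 := Nat.div_eq_of_lt h32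
        simp [this, Nat.mod_eq_of_lt h32]
    · have hpos : (0 : Int) < ((m / 32 : Nat) : Int) := by
        have : 0 < m / 32 := Nat.div_pos (by omega) (by norm_num)
        exact_mod_cast this
      rw [dif_pos hpos, ih (m / 32) (by omega)]
      rw [if_neg (by omega : ¬ m = 0), if_neg (by omega : ¬ m / 32 = 0)]
      conv_rhs => rw [Nat.digits_def' (by norm_num : 1 < 32) (show 0 < m by omega)]
      simp

-- A's power-weighted fold is ofDigits of the reversed digit list
theorem pvFoldA (ds : List Nat) (acc : Int) :
    (List.range ds.length).foldl
      (fun a i => a + ((ds.getD i 0 : Nat) : Int) * 32 ^ (ds.length - i - 1)) acc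
      = acc + ((Nat.ofDigits 32 ds.reverse : Nat) : Int) := by
  induction ds generalizing acc with
  | nil => simp
  | cons d es ih =>
    rw [List.length_cons, List.range_succ_eq_map, List.foldl_cons, List.foldl_map]
    simp only [List.getD_cons_succ, List.getD_cons_zero, Nat.succ_sub_succ]
    rw [ih]
    rw [List.reverse_cons, Nat.ofDigits_append, Nat.ofDigits_singleton]
    push_cast
    simp only [List.length_reverse]
    ring

-- incrementing the little-endian list adds one to its value, keeps digits < 32, stays nonempty
theorem pvIncr_spec (R : List Nat) (hR : ∀ d ∈ R, d < 32) :
    Nat.ofDigits 32 (pvIncr R) = Nat.ofDigits 32 R + 1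
      ∧ (∀ d ∈ pvIncr R, d < 32) ∧ pvIncr R ≠ [] := by
  induction R with
  | nil => refine ⟨by simp [pvIncr, Nat.ofDigits], by simp [pvIncr], by simp [pvIncr]⟩
  | cons d ds ih =>
    have hd : d < 32 := hR d (by simp)
    have hds : ∀ x ∈ ds, x < 32 := fun x hx => hR x (by simp [hx])
    obtain ⟨ih1, ih2, ih3⟩ := ih hds
    by_cases h31 : d = 31
    · subst h31
      have e : pvIncr (31 :: ds) = 0 :: pvIncr ds := by simp [pvIncr]
      refine ⟨?_, ?_, by simp [e]⟩
      · rw [e, Nat.ofDigits_cons, Nat.ofDigits_cons, ih1]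
        ring
      · intro x hx
        rw [e, List.mem_cons] at hx
        rcases hx with h | h
        · omega
        · exact ih2 x h
    · have e : pvIncr (d :: ds) = (d + 1) :: ds := by simp [pvIncr, h31]
      refine ⟨?_, ?_, by simp [e]⟩
      · rw [e, Nat.ofDigits_cons, Nat.ofDigits_cons]
        ring
      · intro x hx
        rw [e, List.mem_cons] at hx
        rcases hx with h | h
        · omega
        · exact hds x h

-- stripping leading zeros of a big-endian digit list of positive value yields the canonical digits
theorem pvStrip_spec (M : List Nat) (hM : ∀ d ∈ M, d < 32) (hne : M ≠ [])
    (hpos : 0 < Nat.ofDigits 32 M.reverse) :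
    pvStrip M = (Nat.digits 32 (Nat.ofDigits 32 M.reverse)).reverse := by
  induction M using pvStrip.induct with
  | case1 d ds ih =>
    have hval : Nat.ofDigits 32 ((0 : Nat) :: d :: ds).reverse
        = Nat.ofDigits 32 (d :: ds).reverse := by
      rw [List.reverse_cons, Nat.ofDigits_append]
      simp
    rw [show pvStrip (0 :: d :: ds) = pvStrip (d :: ds) from rfl, hval]
    exact ih (fun x hx => hM x (by simp [List.mem_cons] at hx ⊢; tauto))
      (by simp) (hval ▸ hpos)
  | case2 l h =>
    have hl : pvStrip l = l := by
      match l, h with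
      | [], _ => rfl
      | [m], _ => cases m <;> rfl
      | 0 :: d :: ds, h => exact absurd rfl (fun e => h d ds e)
      | (m+1) :: d :: ds, _ => rfl
    have hhead : l.head hne ≠ 0 := by
      match l, hne, h with
      | [m], _, _ =>
        simp only [List.head_cons]
        intro e; subst e
        simp at hpos
      | 0 :: d :: ds, _, h => exact absurd rfl (fun e => h d ds e)
      | (m+1) :: d :: ds, _, _ => simp
    have hdig := Nat.digits_ofDigits 32 (by norm_num) l.reverse
      (fun x hx => hM x (by simpa using hx))
      (fun h' => by rw [List.getLast_reverse h'] ; exact hhead)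
    rw [hl, hdig, List.reverse_reverse]

-- first index of a present element
theorem pvIdxOf?_of_mem (l : List Char) (c : Char) (h : c ∈ l) :
    List.idxOf? c l = some (l.idxOf c) := by
  induction l with
  | nil => simp at h
  | cons x xs ih =>
    by_cases hx : x = c
    · subst hx; simp [List.idxOf?_cons]
    · have hc : c ∈ xs := by simpa [hx, Ne.symm hx] using h
      simp [List.idxOf?_cons, hx, ih hc]

-- pvConvert of a positive value renders the padded canonical digits
theorem pvConvert_pos (m : Nat) (hm : 0 < m) :
    pvConvert (m : Int)
      = String.ofList ((List.replicate (8 - (Nat.digits 32 m).length) 0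
                      ++ (Nat.digits 32 m).reverse).map (fun d => pvAlpha.getD d '0')) := by
  have hlt : ∀ d ∈ Nat.digits 32 m, d < 32 := fun d hd => Nat.digits_lt_base (by norm_num) hd
  unfold pvConvert
  dsimp only
  rw [pvConvLoop_natCast, if_neg (by omega : ¬ m = 0)]
  set Ld := Nat.digits 32 m with hLd
  have h1 : (Ld.map Int.ofNat) ++ List.replicate (8 - (Ld.map Int.ofNat).length) (0:Int)
      = (Ld ++ List.replicate (8 - Ld.length) 0).map Int.ofNat := by
    simp [List.map_replicate]
  rw [h1, ← List.map_reverse, List.reverse_append, List.reverse_replicate]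
  congr 1
  rw [List.map_map]
  apply List.map_congr_left
  intro d hd
  have hd32 : d < 32 := by
    rcases List.mem_append.mp hd with h | h
    · exact (List.eq_of_mem_replicate h) ▸ (by norm_num)
    · exact hlt d (List.mem_reverse.mp h)
  simp only [Function.comp_apply, Int.ofNat_eq_natCast, PySem.List.pyGet?_natCast]
  rw [List.getD_eq_getElem?_getD]

-- ===== VERDICT (by name: the statement is the Claim_ definition above) =====
theorem generate_identity_spec : Claim_equal_generate_identity := by
  intro cid _ hpre'
  have hpre : ∀ c ∈ cid.toList, c ∈ pvAlpha := by
    intro c hc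
    simpa using List.all_eq_true.mp hpre' c hc
  unfold Spec_generate_identity
  by_cases hc : cid = ""
  · subst hc
    have h0 : (0 : Int) = ((0 : Nat) : Int) := rfl
    have hcl : pvConvLoop 0 = [0] := by rw [h0, pvConvLoop_natCast]; simp
    rw [generate_identity, if_pos rfl]
    unfold pvConvert
    rw [hcl]
    rfl
  · -- nonempty input: both sides render the padded canonical digits of N + 1
    rw [generate_identity, if_neg hc, generate_identity_alt, if_neg hc]
    dsimp only
    have hL : cid.toList ≠ [] := by
      intro h; exact hc (by rwa [← String.toList_eq_nil_iff])
    set L := cid.toList with hLdef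
    set ds := L.map (fun c => pvAlpha.idxOf c) with hds
    have hlen : ds.length = L.length := by rw [hds, List.length_map]
    have hdlt : ∀ x ∈ ds, x < 32 := by
      intro x hx
      rw [hds] at hx
      obtain ⟨c, hcL, rfl⟩ := List.mem_map.mp hx
      have := List.idxOf_lt_length_of_mem (hpre c hcL)
      simpa [pvAlpha] using this
    -- A's fold computes the value N = ofDigits 32 ds.reverse
    have hfold :
        (List.range L.length).foldl
          (fun acc i =>
            acc + (((PySem.List.index? pvAlpha (L.getD i ' ')).getD 0 : Nat) : Int)
                    * 32 ^ (L.length - i - 1)) 0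
          = ((Nat.ofDigits 32 ds.reverse : Nat) : Int) := by
      rw [← hlen]
      have hcongr := PySem.List.foldl_congr_mem (List.range ds.length)
        (fun acc i =>
          acc + (((PySem.List.index? pvAlpha (L.getD i ' ')).getD 0 : Nat) : Int)
                  * 32 ^ (ds.length - i - 1))
        (fun a i => a + ((ds.getD i 0 : Nat) : Int) * 32 ^ (ds.length - i - 1)) 0 ?_
      · rw [hcongr, pvFoldA]; ring
      · intro acc i hi
        dsimp only
        have hi' : i < ds.length := by simpa using List.mem_range.mp hi
        have hiL : i < L.length := by omega
        have hgetL : L.getD i ' ' = L[i] := List.getD_eq_getElem L ' ' hiL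
        have hmem : L[i] ∈ pvAlpha := hpre _ (List.getElem_mem hiL)
        have hidx : PySem.List.index? pvAlpha L[i] = some (pvAlpha.idxOf L[i]) := by
          rw [PySem.List.index?_eq_idxOf?]
          exact pvIdxOf?_of_mem _ _ hmem
        have hget : ds.getD i 0 = pvAlpha.idxOf L[i] := by
          rw [List.getD_eq_getElem ds 0 hi']
          simp [hds]
        rw [hgetL, hidx, hget, hlen]
        rfl
    rw [hfold]
    have hN1 : ((Nat.ofDigits 32 ds.reverse : Nat) : Int) + 1
        = (((Nat.ofDigits 32 ds.reverse + 1 : Nat)) : Int) := by push_cast; ring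
    rw [hN1, pvConvert_pos _ (by omega)]
    -- B's side
    obtain ⟨hi1, hi2, hi3⟩ := pvIncr_spec ds.reverse
      (fun x hx => hdlt x (List.mem_reverse.mp hx))
    set M := (pvIncr ds.reverse).reverse with hM
    have hMval : Nat.ofDigits 32 M.reverse = Nat.ofDigits 32 ds.reverse + 1 := by
      rw [hM, List.reverse_reverse, hi1]
    have hstrip := pvStrip_spec M
      (fun x hx => hi2 x (List.mem_reverse.mp (hM ▸ hx)))
      (by simp [hM, hi3])
      (by rw [hMval]; omega)
    rw [hstrip, hMval]
    rw [List.length_reverse]
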